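-- pv_equiv track=rewrite | github.com/vellacognitive/vella-substrate | sdk/python/vella/evaluator.py | _parse_unsigned_int_strict
-- ===== SOURCE A (Python) =====
-- import math
--
-- def _parse_unsigned_int_strict(text: str) -> int:
--     if len(text) == 0:
--         return -1
--     value = 0
--     for ch in text:
--         code = ord(ch)
--         if code < 48 or code > 57:
--             return -1
--         value = (value * 10) + (code - 48)
--         if not math.isfinite(value):
--             return -1
--     return value & 0xFFFFFFFF
-- ===== SOURCE B (Python) =====
-- def _parse_unsigned_int_strict(text: str) -> int:
--     if not text:
--         return -1
--     if all('0' <= c <= '9' for c in text):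
--         return int(text) & 0xFFFFFFFF
--     return -1
-- ===== Notes on version B (the rewrite author's own statement) =====
-- stated objective: simpler
-- what changed: Replaced A's single validate-and-accumulate Horner loop (with a dead math.isfinite check) by a pure validation pass over explicit ASCII digit ranges followed by a library int() conversion masked to 32 bits.
import Mathlib
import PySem

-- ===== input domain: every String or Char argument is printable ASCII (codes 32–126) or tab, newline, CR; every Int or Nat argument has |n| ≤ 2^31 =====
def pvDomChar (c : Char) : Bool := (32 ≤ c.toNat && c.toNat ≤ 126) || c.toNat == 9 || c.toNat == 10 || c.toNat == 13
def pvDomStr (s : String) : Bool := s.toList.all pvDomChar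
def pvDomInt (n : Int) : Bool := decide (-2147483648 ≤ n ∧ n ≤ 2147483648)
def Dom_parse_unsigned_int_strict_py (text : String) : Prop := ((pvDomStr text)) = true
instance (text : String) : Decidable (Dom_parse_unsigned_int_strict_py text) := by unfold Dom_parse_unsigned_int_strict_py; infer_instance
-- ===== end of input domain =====

-- B replaces A's validate-and-accumulate Horner loop by a validation pass plus a library
-- decimal conversion masked to 32 bits (objective: simpler). A's math.isfinite check is dead
-- for Python ints and has no counterpart.

-- ===== PORT A =====
-- the loop 'for ch in text: …' with its early returns; the math.isfinite test is always
-- true on Python ints, so it is ported as the identity branch it is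
def pvLoopA : List Char → Int → Int
  | [], value => PySem.Int.band value 0xFFFFFFFF  -- after the loop: value & 0xFFFFFFFF
  | ch :: rest, value =>
    let code : Int := ch.toNat  -- ord(ch)
    if code < 48 || code > 57 then -1
    else pvLoopA rest (value * 10 + (code - 48))

def parse_unsigned_int_strict_py (text : String) : Int :=
  if PySem.Str.len text = 0 then -1 else pvLoopA text.toList 0

-- ===== PORT B =====
-- '0' <= c <= '9' via character codes
def pvIsAsciiDigit (c : Char) : Bool := 48 ≤ c.toNat && c.toNat ≤ 57

-- port of int(text): exact for the all-ASCII-digit, nonempty text it is applied to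
def pvDecVal (cs : List Char) : Int := cs.foldl (fun a c => a * 10 + ((c.toNat : Int) - 48)) 0

def parse_unsigned_int_strict_py_alt (text : String) : Int :=
  if text = "" then -1
  else if text.toList.all pvIsAsciiDigit then PySem.Int.band (pvDecVal text.toList) 0xFFFFFFFF
  else -1

-- ===== PRECONDITION & SPEC =====
def Spec_parse_unsigned_int_strict_py (text : String) (out : Int) : Prop := out = parse_unsigned_int_strict_py_alt text
instance (text : String) (out : Int) : Decidable (Spec_parse_unsigned_int_strict_py text out) := by unfold Spec_parse_unsigned_int_strict_py; infer_instance

-- ===== CLAIM (what is proved, stated in full; the proofs are below) =====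
def Claim_equal_parse_unsigned_int_strict_py : Prop := ∀ (text : String), Dom_parse_unsigned_int_strict_py text → Spec_parse_unsigned_int_strict_py text (parse_unsigned_int_strict_py text)

-- ===== LEMMAS AND PROOFS =====
lemma pvLoopA_digits (l : List Char) : ∀ v : Int, l.all pvIsAsciiDigit = true →
    pvLoopA l v = PySem.Int.band (l.foldl (fun a c => a * 10 + ((c.toNat : Int) - 48)) v) 0xFFFFFFFF := by
  induction l with
  | nil => intro v _; simp [pvLoopA]
  | cons c rest ih =>
    intro v h
    simp only [List.all_cons, Bool.and_eq_true, pvIsAsciiDigit, decide_eq_true_eq] at h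
    have h1 : ¬ ((c.toNat : Int) < 48 || (c.toNat : Int) > 57) = true := by
      simp only [Bool.or_eq_true, decide_eq_true_eq]
      omega
    simp only [pvLoopA, List.foldl_cons]
    rw [if_neg h1]
    exact ih _ h.2

lemma pvLoopA_nondigit (l : List Char) : ∀ v : Int, l.all pvIsAsciiDigit = false →
    pvLoopA l v = -1 := by
  induction l with
  | nil => intro v h; simp at h
  | cons c rest ih =>
    intro v h
    simp only [List.all_cons, Bool.and_eq_false_iff, pvIsAsciiDigit] at h
    simp only [pvLoopA]
    by_cases hd : ((c.toNat : Int) < 48 || (c.toNat : Int) > 57) = true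
    · rw [if_pos hd]
    · rw [if_neg hd]
      simp only [Bool.or_eq_true, decide_eq_true_eq, not_or, not_lt, gt_iff_lt] at hd
      apply ih
      rcases h with h | h
      · exfalso; simp only [decide_eq_false_iff_not, not_le] at h
        omega
      · exact h

-- ===== VERDICT (by name: the statement is the Claim_ definition above) =====
theorem parse_unsigned_int_strict_py_spec : Claim_equal_parse_unsigned_int_strict_py := by
  intro text _
  unfold Spec_parse_unsigned_int_strict_py parse_unsigned_int_strict_py parse_unsigned_int_strict_py_alt
  by_cases he : text = ""
  · subst he; simp [PySem.Str.len]
  · have hlen : ¬ PySem.Str.len text = 0 := by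
      simp [PySem.Str.len]
      exact he
    rw [if_neg hlen, if_neg he]
    by_cases hd : text.toList.all pvIsAsciiDigit = true
    · rw [if_pos hd, pvLoopA_digits _ _ hd]; rfl
    · rw [if_neg hd, pvLoopA_nondigit _ _ (by simpa using hd)]
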